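-- pv_equiv track=rewrite | github.com/alexcritschristoph/strains_analysis | strainRepMultiSample.py | call_snv_site
-- ===== SOURCE A (Python) =====
-- def call_snv_site(counts, min_cov = 5, min_snp = 3):
--     '''
--     Determines whether a site has a variant based on its nucleotide count frequencies.
--     '''
--     P2C = {'A':0, 'C':1, 'T':2, 'G':3}
--     C2P = {0:'A', 1:'C', 2:'T', 3:'G'}
--     total =  sum(counts)
--     if total >= min_cov:
--         i = 0
--         for c in counts:
--             if c >= min_snp:
--                 i += 1
--         if i > 1:
--             return C2P[counts.index(max(counts))]
--     else:
--         return False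
-- ===== SOURCE B (Python) =====
-- def call_snv_site(counts, min_cov = 5, min_snp = 3):
--     '''
--     Determines whether a site has a variant based on its nucleotide count frequencies.
--     '''
--     if sum(counts) < min_cov:
--         return False
--     ranked = sorted(counts, reverse=True)
--     if len(ranked) > 1 and ranked[1] >= min_snp:
--         return "ACTG"[counts.index(max(counts))]
-- ===== Notes on version B (the rewrite author's own statement) =====
-- stated objective: alternative
-- what changed: B replaces A's threshold-counting loop by sorting a copy of counts descending and testing whether the second-largest count clears min_snp, and replaces the int-keyed C2P dict by direct indexing into the string "ACTG".
-- outside the precondition, e.g. on call_snv_site([1, 0, 0, 0], 5, 3): A returns False, B returns False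
import Mathlib
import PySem

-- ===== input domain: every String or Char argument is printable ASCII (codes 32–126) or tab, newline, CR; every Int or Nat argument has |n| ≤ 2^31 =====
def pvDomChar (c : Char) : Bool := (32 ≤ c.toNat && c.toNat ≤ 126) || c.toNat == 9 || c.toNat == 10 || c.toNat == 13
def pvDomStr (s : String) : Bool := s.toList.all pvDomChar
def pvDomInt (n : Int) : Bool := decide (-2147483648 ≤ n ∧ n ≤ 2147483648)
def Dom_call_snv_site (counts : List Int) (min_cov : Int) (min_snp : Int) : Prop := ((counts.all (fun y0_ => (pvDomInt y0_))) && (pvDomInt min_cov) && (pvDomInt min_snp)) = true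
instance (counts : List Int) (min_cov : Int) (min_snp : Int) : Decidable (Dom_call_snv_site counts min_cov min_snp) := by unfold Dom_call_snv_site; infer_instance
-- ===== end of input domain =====

-- B decides the variant test via the second-largest of a descending-sorted copy instead of counting
-- threshold-clearing entries, and indexes "ACTG" instead of an int-keyed dict (alternative decomposition,
-- same return values).

-- ===== PORT A =====
def call_snv_site (counts : List Int) (min_cov : Int) (min_snp : Int) : Option String :=
  let C2P : PySem.Dict Int String := PySem.Dict.ofList [(0, "A"), (1, "C"), (2, "T"), (3, "G")]
  let total := counts.sum
  if min_cov ≤ total then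
    let i := counts.foldl (fun i c => if min_snp ≤ c then i + 1 else i) (0 : Int)
    if 1 < i then
      match PySem.List.max? counts (fun x => x) with
      | none => none          -- max([]) : ValueError, excluded by Pre_
      | some m =>
        match PySem.List.index? counts m with
        | none => none        -- unreachable: max is a member
        | some idx => C2P.get? (idx : Int)   -- none = KeyError, excluded by Pre_
    else none                 -- Python falls through: returns None
  else none                   -- Python returns False (a bool, not a str): excluded by Pre_

-- ===== PORT B =====
def call_snv_site_alt (counts : List Int) (min_cov : Int) (min_snp : Int) : Option String :=
  if counts.sum < min_cov then none   -- Python returns False here: excluded by Pre_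
  else
    let ranked := PySem.List.sorted counts (fun x => x) true
    if h : 1 < ranked.length then
      if min_snp ≤ ranked[1] then
        match PySem.List.max? counts (fun x => x) with
        | none => none
        | some m =>
          match PySem.List.index? counts m with
          | none => none
          | some idx => (PySem.Str.pyGet? "ACTG" (idx : Int)).map (fun c => String.ofList [c])
      else none
    else none

-- ===== PRECONDITION & SPEC =====
-- Pre_ excludes (a) inputs with sum(counts) < min_cov, where A returns False — a bool, not a value of the
-- declared Optional[str] type (B returns False there too) — and (b) variant sites whose first maximal count
-- sits at index ≥ 4, where A raises KeyError (and B raises IndexError).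
def Pre_call_snv_site (counts : List Int) (min_cov : Int) (min_snp : Int) : Prop :=
  min_cov ≤ counts.sum ∧
  (1 < counts.countP (fun c => decide (min_snp ≤ c)) →
    ((counts.take 4).any (fun c => counts.all (fun d => decide (d ≤ c)))) = true)
instance (counts : List Int) (min_cov : Int) (min_snp : Int) : Decidable (Pre_call_snv_site counts min_cov min_snp) := by unfold Pre_call_snv_site; infer_instance
def pvWitness_call_snv_site : List Int × Int × Int := ([5, 5, 0, 0], 5, 3)

def Spec_call_snv_site (counts : List Int) (min_cov : Int) (min_snp : Int) (out : Option String) : Prop := out = call_snv_site_alt counts min_cov min_snp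
instance (counts : List Int) (min_cov : Int) (min_snp : Int) (out : Option String) : Decidable (Spec_call_snv_site counts min_cov min_snp out) := by unfold Spec_call_snv_site; infer_instance

-- ===== CLAIM (what is proved, stated in full; the proofs are below) =====
def Claim_equal_call_snv_site : Prop := ∀ (counts : List Int) (min_cov : Int) (min_snp : Int), Dom_call_snv_site counts min_cov min_snp → Pre_call_snv_site counts min_cov min_snp → Spec_call_snv_site counts min_cov min_snp (call_snv_site counts min_cov min_snp)

-- ===== LEMMAS AND PROOFS =====

-- A's counting loop is countP, cast to Int
theorem count_loop_eq (counts : List Int) (min_snp : Int) :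
    counts.foldl (fun i c => if min_snp ≤ c then i + 1 else i) (0 : Int)
      = (counts.countP (fun c => decide (min_snp ≤ c)) : Int) := by
  simpa using PySem.List.foldl_count_if (fun c => decide (min_snp ≤ c)) counts 0

-- "more than one entry ≥ min_snp" is "the second-largest of the descending sort is ≥ min_snp"
theorem second_largest_iff (counts : List Int) (min_snp : Int) :
    1 < counts.countP (fun c => decide (min_snp ≤ c)) ↔
      ∃ h : 1 < (PySem.List.sorted counts (fun x => x) true).length,
        min_snp ≤ (PySem.List.sorted counts (fun x => x) true)[1] := by
  have hperm := PySem.List.sorted_perm counts (fun x => x) true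
  have hpair := PySem.List.sorted_pairwise_rev counts (fun x => x)
  rw [← hperm.countP_eq]
  set s := PySem.List.sorted counts (fun x => x) true with hs
  clear_value s
  match s, hpair with
  | [], _ => simp
  | [a], _ => simp [List.countP_cons]; split <;> simp
  | a :: b :: r, hpair =>
    rw [List.pairwise_cons] at hpair
    obtain ⟨hfa, hpair2⟩ := hpair
    rw [List.pairwise_cons] at hpair2
    obtain ⟨hrb, -⟩ := hpair2
    have hba : b ≤ a := hfa b (by simp)
    simp only [List.length_cons, List.getElem_cons_succ, List.getElem_cons_zero]
    constructor
    · intro hcount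
      refine ⟨by omega, ?_⟩
      by_contra hnb
      rw [not_le] at hnb
      have hr0 : r.countP (fun c => decide (min_snp ≤ c)) = 0 := by
        rw [List.countP_eq_zero]
        intro x hx
        simp only [decide_eq_true_eq, not_le]
        exact lt_of_le_of_lt (hrb x hx) hnb
      have hnb' : ¬ (min_snp ≤ b) := not_le.mpr hnb
      simp only [List.countP_cons, hr0, hnb'] at hcount
      simp at hcount
      split at hcount <;> omega
    · rintro ⟨-, hb⟩
      have ha : min_snp ≤ a := le_trans hb hba
      simp [ha, hb]

-- under Pre_'s clause (b) the first index of the maximum is < 4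
theorem idx_lt_four {counts : List Int} {m : Int} {idx : Nat}
    (hany : ((counts.take 4).any (fun c => counts.all (fun d => decide (d ≤ c)))) = true)
    (hm : PySem.List.max? counts (fun x => x) = some m)
    (hidx : PySem.List.index? counts m = some idx) : idx < 4 := by
  simp only [List.any_eq_true, List.all_eq_true, decide_eq_true_eq] at hany
  obtain ⟨c, hc4, hcmax⟩ := hany
  have hcmem : c ∈ counts := List.mem_of_mem_take hc4
  have hmmem : m ∈ counts := PySem.List.max?_mem hm
  have hcm : c = m := le_antisymm (PySem.List.max?_isMax hm c hcmem) (hcmax m hmmem)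
  subst hcm
  obtain ⟨pre, suf, hsplit, hlen, hnotin⟩ := (PySem.List.index?_eq_some_iff counts c idx).mp hidx
  by_contra h4
  rw [not_lt] at h4
  have htk : counts.take 4 = pre.take 4 := by
    rw [hsplit, List.take_append_of_le_length (by omega)]
  rw [htk] at hc4
  exact hnotin (List.mem_of_mem_take hc4)

-- ===== VERDICT (by name: the statement is the Claim_ definition above) =====
theorem call_snv_site_spec : Claim_equal_call_snv_site := by
  intro counts min_cov min_snp _ hpre
  obtain ⟨h1, h2⟩ := hpre
  have hnl : ¬ counts.sum < min_cov := not_lt.mpr h1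
  simp only [Spec_call_snv_site, call_snv_site, call_snv_site_alt, if_pos h1, if_neg hnl]
  rw [count_loop_eq]
  by_cases hc : 1 < counts.countP (fun c => decide (min_snp ≤ c))
  · obtain ⟨hlen, hsec⟩ := (second_largest_iff counts min_snp).mp hc
    rw [if_pos (show (1 : Int) < _ by exact_mod_cast hc), dif_pos hlen, if_pos hsec]
    have hne : counts ≠ [] := by
      intro h
      rw [h] at hlen
      simp [PySem.List.length_sorted] at hlen
    obtain ⟨m, hm⟩ : ∃ m, PySem.List.max? counts (fun x => x) = some m := by
      cases hmx : PySem.List.max? counts (fun x => x) with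
      | none => exact absurd ((PySem.List.max?_eq_none_iff counts (fun x => x)).mp hmx) hne
      | some m => exact ⟨m, rfl⟩
    obtain ⟨idx, hidx⟩ : ∃ idx, PySem.List.index? counts m = some idx := by
      cases hix : PySem.List.index? counts m with
      | none => exact absurd ((PySem.List.index?_eq_none_iff counts m).mp hix) (by simp [PySem.List.max?_mem hm])
      | some idx => exact ⟨idx, rfl⟩
    rw [hm]
    simp only [hidx]
    have h4 : idx < 4 := idx_lt_four (h2 hc) hm hidx
    interval_cases idx <;> decide
  · rw [if_neg (show ¬ (1 : Int) < _ by exact_mod_cast hc)]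
    by_cases hlen : 1 < (PySem.List.sorted counts (fun x => x) true).length
    · rw [dif_pos hlen, if_neg]
      intro hsec
      exact hc ((second_largest_iff counts min_snp).mpr ⟨hlen, hsec⟩)
    · rw [dif_neg hlen]
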